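-- pv_equiv track=rewrite | github.com/WagJK/AWD | TP/data.py | generate_timeslot_list
-- ===== SOURCE A (Python) =====
-- def generate_timeslot_list(year, month, date, tutor_type):
-- 	result = []
-- 	prefix = year + "-" + month + "-" + date + " "
-- 	for hour in range(9, 17):
-- 		str_hour = str(hour)
-- 		if (hour == 9):
-- 			str_hour = "0" + str(hour)
-- 		if (tutor_type == "Contract"):
-- 			result.append([prefix + str_hour + ":" + "30",
-- 				prefix + str(hour + 1) + ":" + "00"])
-- 			result.append([prefix + str(hour + 1) + ":" + "00",
-- 				prefix + str(hour + 1) + ":" + "30"])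
-- 		else:
-- 			result.append([prefix + str_hour + ":" + "00",
-- 				prefix + str(hour + 1) + ":" + "00"])
-- 	return result
-- ===== SOURCE B (Python) =====
-- def generate_timeslot_list(year, month, date, tutor_type):
--     prefix = year + "-" + month + "-" + date + " "
--     if tutor_type == "Contract":
--         bounds = [prefix + "09:30"]
--         for h in range(10, 18):
--             bounds.append(prefix + str(h) + ":00")
--             bounds.append(prefix + str(h) + ":30")
--     else:
--         bounds = [prefix + "09:00"] + [prefix + str(h) + ":00" for h in range(10, 18)]
--     return [list(p) for p in zip(bounds, bounds[1:])]
-- ===== Notes on version B (the rewrite author's own statement) =====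
-- stated objective: alternative
-- what changed: B builds the ordered list of boundary time strings once (half-hour boundaries for Contract, hourly otherwise) and windows adjacent pairs via zip(bounds, bounds[1:]), replacing A's per-hour loop that emits one or two slot pairs per iteration.
import Mathlib
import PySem

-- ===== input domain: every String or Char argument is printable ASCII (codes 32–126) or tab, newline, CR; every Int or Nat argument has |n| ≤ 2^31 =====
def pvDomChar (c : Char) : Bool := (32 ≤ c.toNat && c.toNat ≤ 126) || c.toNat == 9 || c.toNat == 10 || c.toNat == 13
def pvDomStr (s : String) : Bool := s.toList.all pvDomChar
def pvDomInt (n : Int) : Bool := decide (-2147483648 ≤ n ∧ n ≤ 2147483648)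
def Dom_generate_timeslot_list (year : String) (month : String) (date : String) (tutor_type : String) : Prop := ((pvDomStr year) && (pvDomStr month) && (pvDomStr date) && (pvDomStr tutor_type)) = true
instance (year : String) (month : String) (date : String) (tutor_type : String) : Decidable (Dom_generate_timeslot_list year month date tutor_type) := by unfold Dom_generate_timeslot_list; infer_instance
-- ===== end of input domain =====

-- B builds the ordered boundary-time list once and windows adjacent pairs, instead of A's
-- per-hour loop emitting one or two appends (objective: alternative decomposition, same cost).

-- ===== PORT A =====
def generate_timeslot_list (year : String) (month : String) (date : String) (tutor_type : String) : List (List String) :=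
  let pfx := year ++ "-" ++ month ++ "-" ++ date ++ " "
  (PySem.List.pyRange 9 17 1).foldl (fun result hour =>
    let str_hour := PySem.Int.toStr hour
    let str_hour := if hour = 9 then "0" ++ PySem.Int.toStr hour else str_hour
    if tutor_type = "Contract" then
      (result ++ [[pfx ++ str_hour ++ ":" ++ "30",
                   pfx ++ PySem.Int.toStr (hour + 1) ++ ":" ++ "00"]]) ++
        [[pfx ++ PySem.Int.toStr (hour + 1) ++ ":" ++ "00",
          pfx ++ PySem.Int.toStr (hour + 1) ++ ":" ++ "30"]]
    else
      result ++ [[pfx ++ str_hour ++ ":" ++ "00",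
                  pfx ++ PySem.Int.toStr (hour + 1) ++ ":" ++ "00"]]) []

-- ===== PORT B =====
def generate_timeslot_list_alt (year : String) (month : String) (date : String) (tutor_type : String) : List (List String) :=
  let pfx := year ++ "-" ++ month ++ "-" ++ date ++ " "
  let bounds :=
    if tutor_type = "Contract" then
      (PySem.List.pyRange 10 18 1).foldl (fun bounds h =>
        bounds ++ [pfx ++ PySem.Int.toStr h ++ ":00"] ++ [pfx ++ PySem.Int.toStr h ++ ":30"])
        [pfx ++ "09:30"]
    else
      [pfx ++ "09:00"] ++ (PySem.List.pyRange 10 18 1).map (fun h => pfx ++ PySem.Int.toStr h ++ ":00")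
  (bounds.zip bounds.tail).map (fun p => [p.1, p.2])

-- ===== PRECONDITION & SPEC =====
def Spec_generate_timeslot_list (year : String) (month : String) (date : String) (tutor_type : String) (out : List (List String)) : Prop := out = generate_timeslot_list_alt year month date tutor_type
instance (year : String) (month : String) (date : String) (tutor_type : String) (out : List (List String)) : Decidable (Spec_generate_timeslot_list year month date tutor_type out) := by unfold Spec_generate_timeslot_list; infer_instance

-- ===== CLAIM (what is proved, stated in full; the proofs are below) =====
def Claim_equal_generate_timeslot_list : Prop := ∀ (year : String) (month : String) (date : String) (tutor_type : String), Dom_generate_timeslot_list year month date tutor_type → Spec_generate_timeslot_list year month date tutor_type (generate_timeslot_list year month date tutor_type)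

-- ===== LEMMAS AND PROOFS =====

-- ===== VERDICT (by name: the statement is the Claim_ definition above) =====
theorem generate_timeslot_list_spec : Claim_equal_generate_timeslot_list := by
  intro year month date tutor_type _
  unfold Spec_generate_timeslot_list generate_timeslot_list generate_timeslot_list_alt
  have hr1 : PySem.List.pyRange 9 17 1 = [9,10,11,12,13,14,15,16] := by decide
  have hr2 : PySem.List.pyRange 10 18 1 = [10,11,12,13,14,15,16,17] := by decide
  by_cases h : tutor_type = "Contract" <;>
    simp [h, hr1, hr2, String.append_assoc] <;> decide
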